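-- pv_equiv track=rewrite | github.com/miliar/Code_Jam_Webscraper | solutions_python/solutions_year16_round1_nr1/1046.py | check
-- ===== SOURCE A (Python) =====
-- def check(S):
--     slist = list(S)
--
--     result = []
--     for c in slist:
--         if len(result) == 0:
--             result.append(c)
--         elif result[0] <= c:
--             result.insert(0, c)
--         else:
--             result.append(c)
--
--     return "".join(result)
-- ===== SOURCE B (Python) =====
-- def check(S):
--     pm = []
--     m = None
--     for c in S:
--         if m is None or c > m:
--             m = c
--         pm.append(m)
--     return ("".join(c for c, p in zip(S[::-1], pm[::-1]) if c == p)
--             + "".join(c for c, p in zip(S, pm) if c != p))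
-- ===== Notes on version B (the rewrite author's own statement) =====
-- stated objective: faster
-- what changed: Replaces A's branch-driven insert(0)/append construction with a prefix-maximum array computed first and an assembly stage of two filtered traversals (the record characters, read off the reversed string by the test c == prefix_max, then the non-records), avoiding quadratic front insertion.
import Mathlib
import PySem

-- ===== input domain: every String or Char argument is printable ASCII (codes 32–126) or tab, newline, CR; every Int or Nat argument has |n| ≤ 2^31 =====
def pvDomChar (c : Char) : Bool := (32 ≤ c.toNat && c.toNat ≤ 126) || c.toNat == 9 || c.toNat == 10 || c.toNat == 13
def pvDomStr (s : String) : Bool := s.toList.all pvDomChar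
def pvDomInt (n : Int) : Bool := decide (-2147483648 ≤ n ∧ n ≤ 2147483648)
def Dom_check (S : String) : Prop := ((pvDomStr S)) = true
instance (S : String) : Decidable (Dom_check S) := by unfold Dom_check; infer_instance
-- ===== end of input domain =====

-- B replaces A's quadratic insert-at-front construction with a staged linear algorithm:
-- first a prefix-maximum array, then the output assembled from two filtered traversals
-- (records, read off the reversed string by the test c == prefix max, then non-records).


-- ===== PORT A =====
def checkStep (result : List Char) (c : Char) : List Char :=
  if result.length = 0 then result ++ [c]
  else if result.head! ≤ c then c :: result
  else result ++ [c]

def check (S : String) : String :=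
  String.mk (S.toList.foldl checkStep [])

-- ===== PORT B =====
-- prefix-maximum array: pm[i] = max of S[0..i] (Python's running `m`, None before the first char)
def pmAux (l : List Char) (m : Option Char) : List Char :=
  match l with
  | [] => []
  | c :: t =>
    let m' := match m with
      | none => c
      | some x => if x < c then c else x
    m' :: pmAux t (some m')

def check_alt (S : String) : String :=
  let cs := S.toList
  let pm := pmAux cs none
  let z := cs.zip pm
  String.mk (((z.reverse.filter (fun p => p.1 == p.2)).map Prod.fst)
             ++ ((z.filter (fun p => p.1 != p.2)).map Prod.fst))

-- ===== PRECONDITION & SPEC =====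
def Spec_check (S : String) (out : String) : Prop := out = check_alt S
instance (S : String) (out : String) : Decidable (Spec_check S out) := by unfold Spec_check; infer_instance

-- ===== CLAIM (what is proved, stated in full; the proofs are below) =====
def Claim_equal_check : Prop := ∀ (S : String), Dom_check S → Spec_check S (check S)

-- ===== LEMMAS AND PROOFS =====

-- records (chars equal to their prefix max) and non-records of cs, given prior running max m
def recsOf (cs : List Char) (m : Option Char) : List Char :=
  ((cs.zip (pmAux cs m)).filter (fun p => p.1 == p.2)).map Prod.fst
def nonrecsOf (cs : List Char) (m : Option Char) : List Char :=
  ((cs.zip (pmAux cs m)).filter (fun p => p.1 != p.2)).map Prod.fst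

-- Invariant linking A's single accumulator to B's record decomposition: if `front` holds the
-- records so far (last one = running max m) and `back` the non-records, then finishing A's fold
-- prepends the remaining records (reversed) and appends the remaining non-records.
lemma check_key (cs : List Char) :
    ∀ (m : Option Char) (front back : List Char),
      front.getLast? = m → (front = [] → back = []) →
      cs.foldl checkStep (front.reverse ++ back) =
        (front ++ recsOf cs m).reverse ++ (back ++ nonrecsOf cs m) := by
  induction cs with
  | nil => intro m front back _ _; simp [recsOf, nonrecsOf, pmAux]
  | cons c t ih =>
    intro m front back hlast hemp
    match m with
    | none =>
      have hf : front = [] := List.getLast?_eq_none_iff.mp hlast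
      have hb : back = [] := hemp hf
      subst hf; subst hb
      simp only [List.foldl_cons, checkStep, recsOf, nonrecsOf, pmAux, List.zip_cons_cons,
        List.filter_cons]
      simp only [List.reverse_nil, List.nil_append, List.length_nil,
        beq_self_eq_true, bne_self_eq_false, if_true, Bool.false_eq_true, if_false,
        List.map_cons]
      have := ih (some c) [c] [] (by simp) (by simp)
      simp only [List.reverse_cons, List.reverse_nil, List.nil_append, List.append_nil] at this
      simpa [recsOf, nonrecsOf] using this
    | some x =>
      have hf : front ≠ [] := by
        intro h; rw [h] at hlast; simp at hlast
      have hx : front.getLast hf = x := by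
        have h := List.getLast?_eq_some_getLast hf
        rw [h] at hlast
        exact Option.some.inj hlast
      have hfe : front = front.dropLast ++ [x] := by
        conv_lhs => rw [← List.dropLast_concat_getLast hf]
        rw [hx]
      have hrev : front.reverse ++ back = x :: (front.dropLast.reverse ++ back) := by
        conv_lhs => rw [hfe]
        simp
      simp only [List.foldl_cons]
      rw [hrev]
      simp only [checkStep, List.length_cons, Nat.succ_ne_zero, if_false, List.head!]
      by_cases hle : x ≤ c
      · -- record step: the prefix max becomes c and c == pm holds
        have hm' : (if x < c then c else x) = c := by
          rcases lt_or_eq_of_le hle with h | h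
          · simp [h]
          · simp [h]
        rw [if_pos hle]
        have h2 : c :: x :: (front.dropLast.reverse ++ back)
            = (front ++ [c]).reverse ++ back := by
          rw [← hrev]; simp
        rw [h2]
        have := ih (some c) (front ++ [c]) back (by simp) (by simp)
        rw [this]
        simp only [recsOf, nonrecsOf, pmAux, hm', List.zip_cons_cons, List.filter_cons,
          beq_self_eq_true, bne_self_eq_false, if_true, Bool.false_eq_true, if_false,
          List.map_cons]
        simp
      · -- non-record step: the prefix max stays x and c == pm fails
        have hlt : c < x := lt_of_not_ge hle
        have hm' : (if x < c then c else x) = x := by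
          simp [not_lt_of_gt hlt]
        have hne : (c == x) = false := by
          simp [ne_of_lt hlt]
        rw [if_neg hle]
        have h2 : x :: (front.dropLast.reverse ++ back) ++ [c]
            = front.reverse ++ (back ++ [c]) := by
          conv_rhs => rw [hfe]
          simp
        rw [h2]
        have := ih (some x) front (back ++ [c]) hlast (fun h => absurd h hf)
        rw [this]
        simp only [recsOf, nonrecsOf, pmAux, hm', List.zip_cons_cons, List.filter_cons,
          hne, Bool.false_eq_true, if_false, bne, Bool.not_false, if_true, List.map_cons]
        simp

-- ===== VERDICT (by name: the statement is the Claim_ definition above) =====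
theorem check_spec : Claim_equal_check := by
  intro S _
  unfold Spec_check check check_alt
  have := check_key S.toList none [] [] (by simp) (fun _ => rfl)
  simp only [List.reverse_nil, List.nil_append, recsOf, nonrecsOf] at this
  rw [this]
  congr 1
  rw [List.filter_reverse, List.map_reverse]
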